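-- pv_equiv track=rewrite | github.com/Mrpointdelicious/metaAgent | agent/open_analytics_agent.py | _find_pending_tool_call
-- ===== SOURCE A (Python) =====
-- from typing import Any
--
-- def _find_pending_tool_call(pending: list[dict[str, Any]], call_id: Any) -> dict[str, Any] | None:
--     if call_id is not None:
--         for item in reversed(pending):
--             if item.get("call_id") == call_id and item.get("output_summary") is None:
--                 return item
--     for item in reversed(pending):
--         if item.get("output_summary") is None:
--             return item
--     return pending[-1] if pending else None
-- ===== SOURCE B (Python) =====
-- def _find_pending_tool_call(pending, call_id):
--     # single reverse pass: fuse A's two reverse scans and the pending[-1] fallback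
--     first = None          # first item seen in reverse order == pending[-1]
--     have_first = False
--     any_none = None       # most recent item with output_summary is None
--     have_any = False
--     matched = None        # most recent item matching call_id with output_summary is None
--     have_match = False
--     for item in reversed(pending):
--         if not have_first:
--             first = item
--             have_first = True
--         unresolved = item.get("output_summary") is None
--         if not have_any and unresolved:
--             any_none = item
--             have_any = True
--         if (not have_match and call_id is not None and unresolved
--                 and item.get("call_id") == call_id):
--             matched = item
--             have_match = True
--     if have_match:
--         return matched
--     if have_any:
--         return any_none
--     return first
-- ===== Notes on version B (the rewrite author's own statement) =====
-- stated objective: alternative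
-- what changed: Replaces A's two separate reverse scans plus a separate pending[-1] fallback with one fused reverse pass that maintains three candidates (last item, most recent unresolved, most recent matching unresolved) and combines them afterwards.
import Mathlib
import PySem

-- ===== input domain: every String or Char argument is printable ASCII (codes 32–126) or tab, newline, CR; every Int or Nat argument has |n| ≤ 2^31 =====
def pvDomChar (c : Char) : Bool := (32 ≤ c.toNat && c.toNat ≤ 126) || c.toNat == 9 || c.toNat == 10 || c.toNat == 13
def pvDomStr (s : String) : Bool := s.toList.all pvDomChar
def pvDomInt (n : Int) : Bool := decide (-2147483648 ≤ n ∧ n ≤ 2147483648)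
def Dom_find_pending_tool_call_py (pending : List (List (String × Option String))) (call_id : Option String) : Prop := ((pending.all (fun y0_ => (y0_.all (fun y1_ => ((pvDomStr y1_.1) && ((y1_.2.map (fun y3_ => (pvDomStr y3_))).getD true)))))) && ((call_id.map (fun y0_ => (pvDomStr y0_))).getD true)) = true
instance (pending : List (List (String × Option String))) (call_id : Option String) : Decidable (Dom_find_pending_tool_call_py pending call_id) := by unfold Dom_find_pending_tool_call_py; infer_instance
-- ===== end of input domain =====

-- B fuses A's two reverse scans and the pending[-1] fallback into one reverse pass
-- maintaining three candidates (alternative decomposition, same cost).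


-- item.get(k): first-match lookup in the association list; missing key and a stored
-- Python None both read back as `none` (exact for the Option String value type)
def pvDGet (item : List (String × Option String)) (k : String) : Option String :=
  match item.find? (fun p => p.1 == k) with
  | some p => p.2
  | none => none

-- ===== PORT A =====
def find_pending_tool_call_py (pending : List (List (String × Option String))) (call_id : Option String) : Option (List (String × Option String)) :=
  let phase1 : Option (List (String × Option String)) :=
    match call_id with
    | none => none
    | some _ =>
        pending.reverse.find? (fun item =>
          (pvDGet item "call_id" == call_id) && (pvDGet item "output_summary" == none))
  match phase1 with
  | some item => some item
  | none =>
    match pending.reverse.find? (fun item => pvDGet item "output_summary" == none) with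
    | some item => some item
    | none => if pending.isEmpty then none else pending.getLast?

-- ===== PORT B =====
-- one step of B's fused reverse pass: fill each not-yet-set candidate slot
def pvStepB (call_id : Option String)
    (st : Option (List (String × Option String)) × Option (List (String × Option String)) × Option (List (String × Option String)))
    (item : List (String × Option String)) :
    Option (List (String × Option String)) × Option (List (String × Option String)) × Option (List (String × Option String)) :=
  let first := if st.1.isNone then some item else st.1
  let unresolved := pvDGet item "output_summary" == none
  let anyN := if st.2.1.isNone && unresolved then some item else st.2.1
  let mat := if st.2.2.isNone && (call_id.isSome && unresolved && (pvDGet item "call_id" == call_id)) then some item else st.2.2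
  (first, anyN, mat)

def find_pending_tool_call_py_alt (pending : List (List (String × Option String))) (call_id : Option String) : Option (List (String × Option String)) :=
  let res := pending.reverse.foldl (pvStepB call_id) (none, none, none)
  match res.2.2 with
  | some i => some i
  | none =>
    match res.2.1 with
    | some i => some i
    | none => res.1

-- ===== PRECONDITION & SPEC =====
def Spec_find_pending_tool_call_py (pending : List (List (String × Option String))) (call_id : Option String) (out : Option (List (String × Option String))) : Prop := out = find_pending_tool_call_py_alt pending call_id
instance (pending : List (List (String × Option String))) (call_id : Option String) (out : Option (List (String × Option String))) : Decidable (Spec_find_pending_tool_call_py pending call_id out) := by unfold Spec_find_pending_tool_call_py; infer_instance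

-- ===== CLAIM (what is proved, stated in full; the proofs are below) =====
def Claim_equal_find_pending_tool_call_py : Prop := ∀ (pending : List (List (String × Option String))) (call_id : Option String), Dom_find_pending_tool_call_py pending call_id → Spec_find_pending_tool_call_py pending call_id (find_pending_tool_call_py pending call_id)

-- ===== LEMMAS AND PROOFS =====

-- characterization of B's fold: each slot is "already set, else first hit in l"
theorem pvFoldB_char (call_id : Option String) (l : List (List (String × Option String)))
    (st : Option (List (String × Option String)) × Option (List (String × Option String)) × Option (List (String × Option String))) :
    l.foldl (pvStepB call_id) st =
      ((if st.1.isNone then l.head? else st.1),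
       if st.2.1.isNone then l.find? (fun item => pvDGet item "output_summary" == none) else st.2.1,
       if st.2.2.isNone then l.find? (fun item => call_id.isSome && (pvDGet item "output_summary" == none) && (pvDGet item "call_id" == call_id)) else st.2.2) := by
  induction l generalizing st with
  | nil => obtain ⟨a, b, c⟩ := st; cases a <;> cases b <;> cases c <;> simp
  | cons x l ih =>
    obtain ⟨a, b, c⟩ := st
    simp only [List.foldl_cons]
    rw [ih]
    cases hS : call_id.isSome <;>
    cases hU : (pvDGet x "output_summary").isNone <;>
    cases hE : (pvDGet x "call_id" == call_id) <;>
    cases a <;> cases b <;> cases c <;>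
      simp [pvStepB, hS, hU, hE]

theorem pv_find?_ext {α : Type} (p q : α → Bool) (h : ∀ a, p a = q a) (l : List α) :
    l.find? p = l.find? q := by
  induction l with
  | nil => rfl
  | cons x l ih => simp [List.find?, h, ih]

theorem find_pending_tool_call_py_spec : Claim_equal_find_pending_tool_call_py := by
  intro pending call_id _
  unfold Spec_find_pending_tool_call_py
  simp only [find_pending_tool_call_py, find_pending_tool_call_py_alt]
  rw [pvFoldB_char]
  simp only [Option.isNone_none, if_true]
  cases call_id with
  | none =>
    have hmat : pending.reverse.find? (fun item => (none : Option String).isSome && (pvDGet item "output_summary" == none) && (pvDGet item "call_id" == (none : Option String))) = none :=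
      List.find?_eq_none.mpr (fun x _ => by simp)
    simp only [hmat]
    cases h2 : pending.reverse.find? (fun item => pvDGet item "output_summary" == none) with
    | some i => simp
    | none =>
      cases pending with
      | nil => simp
      | cons x xs => simp [List.head?_reverse, List.getLast?_cons]
  | some cid =>
    rw [pv_find?_ext (fun item => (pvDGet item "call_id" == some cid) && (pvDGet item "output_summary" == none))
      (fun item => (some cid).isSome && (pvDGet item "output_summary" == none) && (pvDGet item "call_id" == some cid))
      (fun item => by cases h1 : pvDGet item "call_id" == some cid <;> cases h2 : pvDGet item "output_summary" == none <;> simp [h1, h2])]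
    cases h : pending.reverse.find? (fun item => (some cid).isSome && (pvDGet item "output_summary" == none) && (pvDGet item "call_id" == some cid)) with
    | some i => simp
    | none =>
      cases h2 : pending.reverse.find? (fun item => pvDGet item "output_summary" == none) with
      | some i => simp
      | none =>
        cases pending with
        | nil => simp
        | cons x xs => simp [List.head?_reverse, List.getLast?_cons]
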